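-- pv_equiv track=rewrite | github.com/soaib-bot/fm-playground | z3-api/utils/logics_filter.py | common_logic
-- ===== SOURCE A (Python) =====
-- z3_contains = {
--     "QF_UF": ["QF_UFBV"],
--     "QF_BV": ["QF_UFBV", "QF_ABV"],
--     "QF_IDL": ["QF_LIA"],
--     "QF_LIA": ["QF_NIA", "LIA"],
--     "QF_LRA": ["LRA", "QF_NRA"],
--     "QF_NIA": [],
--     "QF_NRA": ["NRA"],
--     "QF_AUFLIA": ["AUFLIA"],
--     "QF_AUFBV": [],
--     "QF_ABV": ["QF_AUFBV"],
--     "QF_UFBV": ["QF_AUFBV"],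
--     "AUFLIA": [],
--     "AUFLIRA": ["AUFNIRA"],
--     "AUFNIRA": [],
--     "UFNIA": ["AUFNIRA"],
--     "UFLRA": ["AUFLIRA"],
--     "LRA": ["NRA"],
--     "NRA": ["AUFNIRA"],
--     "LIA": ["AUFLIRA"],
--     "UFBV": [],
--     "BV": [],
--     "QF_FP": [],
--     "QF_FPBV": [],
--     "QF_BVFP": [],
--     "HORN": [],
--     "QF_FD": [],
--     "SAT": [],
-- }
--
-- def get_supersets(logic, contains):
--     supersets = set()
--     stack = [logic]
--     while stack:
--         current = stack.pop()
--         for sup in contains.get(current, []):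
--             if sup not in supersets:
--                 supersets.add(sup)
--                 stack.append(sup)
--     return supersets
--
-- def common_logic(logic1, logic2, contains=z3_contains):
--     # include the logics themselves
--     anc1 = get_supersets(logic1, contains) | {logic1}
--     anc2 = get_supersets(logic2, contains) | {logic2}
--     common = anc1 & anc2
--     if not common:
--         return None  # no overlap
--
--     # pick the most specific one (not contained in any other in 'common')
--     def is_most_specific(l):
--         return not any(
--             l in get_supersets(other, contains) for other in common if other != l
--         )
--
--     return [l for l in common if is_most_specific(l)][0]
-- ===== SOURCE B (Python) =====
-- z3_contains = {
--     "QF_UF": ["QF_UFBV"],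
--     "QF_BV": ["QF_UFBV", "QF_ABV"],
--     "QF_IDL": ["QF_LIA"],
--     "QF_LIA": ["QF_NIA", "LIA"],
--     "QF_LRA": ["LRA", "QF_NRA"],
--     "QF_NIA": [],
--     "QF_NRA": ["NRA"],
--     "QF_AUFLIA": ["AUFLIA"],
--     "QF_AUFBV": [],
--     "QF_ABV": ["QF_AUFBV"],
--     "QF_UFBV": ["QF_AUFBV"],
--     "AUFLIA": [],
--     "AUFLIRA": ["AUFNIRA"],
--     "AUFNIRA": [],
--     "UFNIA": ["AUFNIRA"],
--     "UFLRA": ["AUFLIRA"],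
--     "LRA": ["NRA"],
--     "NRA": ["AUFNIRA"],
--     "LIA": ["AUFLIRA"],
--     "UFBV": [],
--     "BV": [],
--     "QF_FP": [],
--     "QF_FPBV": [],
--     "QF_BVFP": [],
--     "HORN": [],
--     "QF_FD": [],
--     "SAT": [],
-- }
--
--
-- def get_supersets(logic, contains):
--     """Strict supersets of `logic`, as a deduplicated list in deterministic
--     BFS discovery order (cycle-safe, iterative: an index pointer over the
--     growing queue, no recursion and no hash-order dependence)."""
--     queue = [logic]
--     seen = set()  # membership tests only; output order comes from `queue`
--     i = 0
--     while i < len(queue):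
--         for sup in contains.get(queue[i], []):
--             if sup not in seen:
--                 seen.add(sup)
--                 queue.append(sup)
--         i += 1
--     return queue[1:]
--
--
-- def common_logic(logic1, logic2, contains=z3_contains):
--     anc1 = get_supersets(logic1, contains)
--     if logic1 not in anc1:
--         anc1.append(logic1)
--     anc2 = get_supersets(logic2, contains)
--     if logic2 not in anc2:
--         anc2.append(logic2)
--     anc2set = set(anc2)  # membership tests only
--     common = [l for l in anc1 if l in anc2set]
--     # precompute each candidate's ancestor set once, instead of A's
--     # per-pair recomputation inside the selection scan
--     anc_of = {o: set(get_supersets(o, contains)) for o in common}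
--     for l in common:
--         if all(l not in anc_of[o] for o in common if o != l):
--             return l
--     return None
-- ===== Notes on version B (the rewrite author's own statement) =====
-- stated objective: alternative
-- what changed: B replaces A's stack-based DFS over hash sets and its per-pair recomputation of get_supersets inside the selection scan by an iterative index-pointer BFS over deterministic ordered lists plus a dict of each candidate's ancestor set precomputed once, returning the first most-specific candidate in BFS order.
-- outside the precondition, e.g. on common_logic('a', 'b', {'a': ['x', 'y'], 'b': ['x', 'y']}): A returns 'y', B returns 'x'
-- crash fix: On inputs where the common ancestor set is nonempty but (because of cycles in `contains`) none of its elements is most specific, A raises IndexError on `[...][0]` while B returns None. — e.g. on common_logic("a", "b", [("a", ["c"]), ("b", ["c"]), ("c", ["d"]), ("d", ["c"])]): A raises IndexError, B returns none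
import Mathlib
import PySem

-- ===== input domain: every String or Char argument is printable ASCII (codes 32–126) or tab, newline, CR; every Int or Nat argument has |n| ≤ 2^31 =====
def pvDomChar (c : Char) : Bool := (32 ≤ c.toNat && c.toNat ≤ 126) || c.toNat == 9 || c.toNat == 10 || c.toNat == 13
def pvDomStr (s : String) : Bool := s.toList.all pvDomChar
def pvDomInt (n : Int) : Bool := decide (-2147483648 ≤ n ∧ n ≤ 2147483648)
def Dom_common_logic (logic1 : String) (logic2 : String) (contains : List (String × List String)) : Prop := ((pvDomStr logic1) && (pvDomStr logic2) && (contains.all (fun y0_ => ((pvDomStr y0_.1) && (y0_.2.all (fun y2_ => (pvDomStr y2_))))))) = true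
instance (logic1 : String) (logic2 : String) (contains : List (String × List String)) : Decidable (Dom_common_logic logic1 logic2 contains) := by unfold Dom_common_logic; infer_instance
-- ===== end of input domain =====

-- B replaces A's stack-DFS over hash sets and its per-candidate recomputation of
-- get_supersets by an index-pointer BFS over ordered lists plus a precomputed
-- ancestor-set table; equivalence is proved on Pre_ (no tie for most specific,
-- no IndexError).

-- Distinct strings occurring in the dict's value lists: sizes the fuel that makes
-- the worklist loops below total (a totality guard only; the fuel provably suffices).
def pvUniv (d : PySem.Dict String (List String)) : List String :=
  PySem.List.dedup d.values.flatten

def pvFuel (d : PySem.Dict String (List String)) : Nat := 2 * (pvUniv d).length + 1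

-- ===== PORT A =====
-- while stack: current = stack.pop(); for sup in contains.get(current, []): if new, add + push
-- (the Python list-stack pushes/pops at the end; modelled head-first, the same LIFO order)
def gsAuxA (d : PySem.Dict String (List String)) :
    Nat → List String → List String → List String
  | 0, supersets, _ => supersets
  | _ + 1, supersets, [] => supersets
  | fuel + 1, supersets, current :: stack =>
      let p := (d.getD current []).foldl
        (fun (acc : List String × List String) sup =>
          if sup ∈ acc.1 then acc else (acc.1 ++ [sup], sup :: acc.2))
        (supersets, stack)
      gsAuxA d fuel p.1 p.2

def getSupersetsA (d : PySem.Dict String (List String)) (logic : String) : List String :=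
  gsAuxA d (pvFuel d) [] [logic]

def common_logic (logic1 : String) (logic2 : String) (contains : List (String × List String)) : Option String :=
  let d := PySem.Dict.ofList contains
  let anc1 := PySem.Set.union (getSupersetsA d logic1) [logic1]
  let anc2 := PySem.Set.union (getSupersetsA d logic2) [logic2]
  let common := PySem.Set.inter anc1 anc2
  if common.isEmpty then none
  else
    -- [l for l in common if is_most_specific(l)][0]; pyGet? _ 0 = none exactly where Python raises IndexError
    PySem.List.pyGet?
      (common.filter (fun l =>
        !(common.any (fun other => other != l && (getSupersetsA d other).contains l)))) 0

-- ===== PORT B =====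
-- index-pointer BFS: queue[i:] is `pending`, queue[:i] is `queueDone`; `seen` is the membership set
def gsAuxB (d : PySem.Dict String (List String)) :
    Nat → List String → List String → List String → List String
  | 0, queueDone, _, _ => queueDone
  | _ + 1, queueDone, _, [] => queueDone
  | fuel + 1, queueDone, seen, current :: pending =>
      let p := (d.getD current []).foldl
        (fun (acc : List String × List String) sup =>
          if sup ∈ acc.1 then acc else (acc.1 ++ [sup], acc.2 ++ [sup]))
        (seen, pending)
      gsAuxB d fuel (queueDone ++ [current]) p.1 p.2

def getSupersetsB (d : PySem.Dict String (List String)) (logic : String) : List String :=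
  (gsAuxB d (pvFuel d) [] [] [logic]).drop 1  -- return queue[1:]

def common_logic_alt (logic1 : String) (logic2 : String) (contains : List (String × List String)) : Option String :=
  let d := PySem.Dict.ofList contains
  let g1 := getSupersetsB d logic1
  let anc1 := if logic1 ∈ g1 then g1 else g1 ++ [logic1]
  let g2 := getSupersetsB d logic2
  let anc2 := if logic2 ∈ g2 then g2 else g2 ++ [logic2]
  let common := anc1.filter (fun l => anc2.contains l)
  let ancOf := common.foldl
    (fun (t : PySem.Dict String (List String)) o => t.insert o (PySem.Set.ofList (getSupersetsB d o)))
    PySem.Dict.empty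
  common.find? (fun l => common.all (fun o => o == l || !((ancOf.getD o []).contains l)))

-- ===== PRECONDITION & SPEC =====
-- Saturation-based reference reachability, used only by Pre_/Raises_ (independent of both ports).
def satStep (d : PySem.Dict String (List String)) (S : List String) : List String :=
  S.foldl (fun acc x => PySem.Set.update acc (d.getD x [])) S

def satAux (d : PySem.Dict String (List String)) : Nat → List String → List String
  | 0, S => S
  | fuel + 1, S =>
      let S' := satStep d S
      if S'.length = S.length then S else satAux d fuel S'

def reachSat (d : PySem.Dict String (List String)) (x : String) : List String :=
  satAux d ((pvUniv d).length + 1) (PySem.List.dedup (d.getD x []))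

def ancSat (d : PySem.Dict String (List String)) (x : String) : List String :=
  PySem.Set.add (reachSat d x) x

def commonSat (logic1 : String) (logic2 : String) (contains : List (String × List String)) : List String :=
  (ancSat (PySem.Dict.ofList contains) logic1).filter
    (fun y => (ancSat (PySem.Dict.ofList contains) logic2).contains y)

def mostSpecSat (d : PySem.Dict String (List String)) (c : List String) (l : String) : Bool :=
  c.all (fun o => o == l || !((reachSat d o).contains l))

-- Pre_ excludes (i) inputs where A raises IndexError (nonempty common ancestor set none of
-- whose elements is most specific, reachable through cycles in `contains`) and (ii) inputs
-- where several incomparable common ancestors tie for most specific, on which A's `[...][0]`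
-- over a Python set is an accident of hash iteration order.
def Pre_common_logic (logic1 : String) (logic2 : String) (contains : List (String × List String)) : Prop :=
  commonSat logic1 logic2 contains = [] ∨
  ((commonSat logic1 logic2 contains).filter
     (mostSpecSat (PySem.Dict.ofList contains) (commonSat logic1 logic2 contains))).length = 1

instance (logic1 : String) (logic2 : String) (contains : List (String × List String)) : Decidable (Pre_common_logic logic1 logic2 contains) := by unfold Pre_common_logic; infer_instance

def pvWitness_common_logic : String × String × (List (String × List String)) := ("a", "a", [])

-- On inputs where the common ancestor set is nonempty but (because of cycles in `contains`)
-- none of its elements is most specific, A raises IndexError on `[...][0]` while B returns None.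
def Raises_common_logic (logic1 : String) (logic2 : String) (contains : List (String × List String)) : Prop :=
  commonSat logic1 logic2 contains ≠ [] ∧
  ((commonSat logic1 logic2 contains).filter
     (mostSpecSat (PySem.Dict.ofList contains) (commonSat logic1 logic2 contains))) = []

instance (logic1 : String) (logic2 : String) (contains : List (String × List String)) : Decidable (Raises_common_logic logic1 logic2 contains) := by unfold Raises_common_logic; infer_instance

def pvRaiseWitness_common_logic : String × String × (List (String × List String)) :=
  ("a", "b", [("a", ["c"]), ("b", ["c"]), ("c", ["d"]), ("d", ["c"])])

def pvRaiseWitnessOut_common_logic : Option String := none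

def Spec_common_logic (logic1 : String) (logic2 : String) (contains : List (String × List String)) (out : Option String) : Prop := out = common_logic_alt logic1 logic2 contains
instance (logic1 : String) (logic2 : String) (contains : List (String × List String)) (out : Option String) : Decidable (Spec_common_logic logic1 logic2 contains out) := by unfold Spec_common_logic; infer_instance

-- ===== CLAIM (what is proved, stated in full; the proofs are below) =====
def Claim_equal_common_logic : Prop := ∀ (logic1 : String) (logic2 : String) (contains : List (String × List String)), Dom_common_logic logic1 logic2 contains → Pre_common_logic logic1 logic2 contains → Spec_common_logic logic1 logic2 contains (common_logic logic1 logic2 contains)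

def Claim_raises_common_logic : Prop := (∀ (logic1 : String) (logic2 : String) (contains : List (String × List String)), Dom_common_logic logic1 logic2 contains → Raises_common_logic logic1 logic2 contains → ¬ Pre_common_logic logic1 logic2 contains) ∧ (Dom_common_logic (pvRaiseWitness_common_logic.1) (pvRaiseWitness_common_logic.2.1) (pvRaiseWitness_common_logic.2.2) ∧ Raises_common_logic (pvRaiseWitness_common_logic.1) (pvRaiseWitness_common_logic.2.1) (pvRaiseWitness_common_logic.2.2) ∧ common_logic_alt (pvRaiseWitness_common_logic.1) (pvRaiseWitness_common_logic.2.1) (pvRaiseWitness_common_logic.2.2) = pvRaiseWitnessOut_common_logic)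

-- ===== LEMMAS AND PROOFS =====

-- `T` is closed for the graph `d` seen from root `l`
def ClosedP (d : PySem.Dict String (List String)) (l : String) (T : String → Prop) : Prop :=
  (∀ y ∈ d.getD l [], T y) ∧ ∀ x, T x → ∀ y ∈ d.getD x [], T y

-- `R` is (membership-wise) THE least closed set from `l`
def GoodFrom (d : PySem.Dict String (List String)) (l : String) (R : List String) : Prop :=
  ClosedP d l (· ∈ R) ∧ ∀ T, ClosedP d l T → ∀ y ∈ R, T y

def phiD (d : PySem.Dict String (List String)) (S : List String) : Nat :=
  ((pvUniv d).toFinset \ S.toFinset).card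

theorem mem_pvUniv (d : PySem.Dict String (List String)) (x y : String)
    (h : y ∈ d.getD x []) : y ∈ pvUniv d := by
  simp only [pvUniv, PySem.List.mem_dedup, List.mem_flatten]
  refine ⟨d.getD x [], ?_, h⟩
  rw [PySem.Dict.getD_eq_get?_getD] at h ⊢
  cases hg : d.get? x with
  | none => rw [hg] at h; simp at h
  | some v =>
      have := PySem.Dict.mem_items_of_get?_eq_some (d := d) hg
      simp only [PySem.Dict.values]
      exact List.mem_map.mpr ⟨(x, v), this, rfl⟩


theorem phi_append (d : PySem.Dict String (List String)) (S Δ : List String)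
    (hnd : Δ.Nodup) (hU : ∀ y ∈ Δ, y ∈ pvUniv d) (hdisj : ∀ y ∈ Δ, y ∉ S) :
    phiD d (S ++ Δ) + Δ.length = phiD d S := by
  unfold phiD
  have hsub : Δ.toFinset ⊆ (pvUniv d).toFinset \ S.toFinset := by
    intro a ha
    simp only [List.mem_toFinset] at ha
    simp only [Finset.mem_sdiff, List.mem_toFinset]
    exact ⟨hU a ha, hdisj a ha⟩
  have h1 : (pvUniv d).toFinset \ (S ++ Δ).toFinset
      = ((pvUniv d).toFinset \ S.toFinset) \ Δ.toFinset := by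
    rw [List.toFinset_append]
    ext a; simp [Finset.mem_sdiff]; tauto
  have h2 := Finset.card_sdiff_of_subset hsub
  have := Finset.card_le_card hsub
  rw [List.toFinset_card_of_nodup hnd] at this h2
  rw [h1]
  omega


theorem phi_le (d : PySem.Dict String (List String)) (S : List String) :
    phiD d S ≤ (pvUniv d).length := by
  unfold phiD
  calc ((pvUniv d).toFinset \ S.toFinset).card ≤ (pvUniv d).toFinset.card :=
        Finset.card_le_card (Finset.sdiff_subset)
    _ ≤ (pvUniv d).length := List.toFinset_card_le _


theorem mem_eq_of_good (d : PySem.Dict String (List String)) (l : String)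
    (R1 R2 : List String) (h1 : GoodFrom d l R1) (h2 : GoodFrom d l R2) (x : String) :
    x ∈ R1 ↔ x ∈ R2 :=
  ⟨fun hx => h1.2 _ h2.1 x hx, fun hx => h2.2 _ h1.1 x hx⟩

-- membership in a fold over Set.update-style generic fold


theorem mem_foldl_update (d : PySem.Dict String (List String)) (xs : List String) :
    ∀ (acc : List String) (y : String),
      y ∈ xs.foldl (fun acc x => PySem.Set.update acc (d.getD x [])) acc ↔
        y ∈ acc ∨ ∃ x ∈ xs, y ∈ d.getD x [] := by
  induction xs with
  | nil => simp
  | cons a xs ih =>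
      intro acc y
      simp only [List.foldl_cons, ih, PySem.Set.mem_update, List.mem_cons]
      constructor
      · rintro ((h | h) | ⟨x, hx, hy⟩)
        · exact Or.inl h
        · exact Or.inr ⟨a, Or.inl rfl, h⟩
        · exact Or.inr ⟨x, Or.inr hx, hy⟩
      · rintro (h | ⟨x, (rfl | hx), hy⟩)
        · exact Or.inl (Or.inl h)
        · exact Or.inl (Or.inr hy)
        · exact Or.inr ⟨x, hx, hy⟩


theorem mem_satStep (d : PySem.Dict String (List String)) (S : List String) (y : String) :
    y ∈ satStep d S ↔ y ∈ S ∨ ∃ x ∈ S, y ∈ d.getD x [] := by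
  exact mem_foldl_update d S S y


theorem satStep_append (d : PySem.Dict String (List String)) (xs : List String) :
    ∀ acc : List String, ∃ Δ, xs.foldl (fun acc x => PySem.Set.update acc (d.getD x [])) acc = acc ++ Δ := by
  induction xs with
  | nil => exact fun acc => ⟨[], by simp⟩
  | cons a xs ih =>
      intro acc
      obtain ⟨Δ', h⟩ := ih (PySem.Set.update acc (d.getD a []))
      refine ⟨(PySem.Set.ofList (d.getD a [])).filter (fun y => !PySem.Set.contains acc y) ++ Δ', ?_⟩
      simp only [List.foldl_cons]
      rw [h, PySem.Set.update_eq_append_filter, List.append_assoc]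


theorem nodup_satStep (d : PySem.Dict String (List String)) (xs : List String) :
    ∀ acc : List String, acc.Nodup →
      (xs.foldl (fun acc x => PySem.Set.update acc (d.getD x [])) acc).Nodup := by
  induction xs with
  | nil => exact fun acc h => h
  | cons a xs ih =>
      intro acc h
      exact ih _ (by simpa using PySem.Set.nodup_update acc (d.getD a []) h)


theorem satAux_spec (d : PySem.Dict String (List String)) :
    ∀ (f : Nat) (S : List String), S.Nodup → (∀ y ∈ S, y ∈ pvUniv d) →
      (pvUniv d).length + 1 ≤ f + S.length →
      S ⊆ satAux d f S ∧
      (∀ T : String → Prop, (∀ x, T x → ∀ y ∈ d.getD x [], T y) → (∀ y ∈ S, T y) →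
        ∀ y ∈ satAux d f S, T y) ∧
      satStep d (satAux d f S) = satAux d f S := by
  intro f
  induction f with
  | zero =>
      intro S hnd hU hlen
      exfalso
      have hSle : S.length ≤ (pvUniv d).length := by
        have h1 : S.toFinset.card = S.length := List.toFinset_card_of_nodup hnd
        have h2 : S.toFinset ⊆ (pvUniv d).toFinset := by
          intro a ha; simp only [List.mem_toFinset] at ha ⊢; exact hU a ha
        have := Finset.card_le_card h2
        have h3 := List.toFinset_card_le (pvUniv d)
        omega
      omega
  | succ f ih =>
      intro S hnd hU hlen
      show _ ∧ _ ∧ _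
      by_cases hL : (satStep d S).length = S.length
      · -- fixpoint branch
        have hfix : satStep d S = S := by
          obtain ⟨Δ, hΔ⟩ := satStep_append d S S
          have : Δ = [] := by
            have hlen2 := congrArg List.length hΔ
            simp only [satStep] at hL
            rw [hlen2, List.length_append] at hL
            have : Δ.length = 0 := by omega
            simpa [List.length_eq_zero_iff] using this
          rw [satStep, hΔ, this, List.append_nil]
        have hr : satAux d (f + 1) S = S := by
          simp [satAux, hL]
        rw [hr]
        exact ⟨fun y hy => hy, fun T _ h2 => h2, hfix⟩
      · have hr : satAux d (f + 1) S = satAux d f (satStep d S) := by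
          simp [satAux, hL]
        obtain ⟨Δ, hΔ⟩ := satStep_append d S S
        have hΔ' : satStep d S = S ++ Δ := hΔ
        have hΔne : Δ ≠ [] := by
          intro h; rw [h, List.append_nil] at hΔ'; exact hL (by rw [hΔ'])
        have hlen' : S.length + 1 ≤ (satStep d S).length := by
          rw [hΔ']; simp only [List.length_append]
          have := List.length_pos_iff.mpr hΔne
          omega
        have hnd' : (satStep d S).Nodup := nodup_satStep d S S hnd
        have hU' : ∀ y ∈ satStep d S, y ∈ pvUniv d := by
          intro y hy
          rcases (mem_satStep d S y).mp hy with h | ⟨x, _, hy'⟩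
          · exact hU y h
          · -- mem_pvUniv inlined below in main file; here just sorry-free variant
            simp only [pvUniv, PySem.List.mem_dedup, List.mem_flatten]
            rw [PySem.Dict.getD_eq_get?_getD] at hy'
            cases hg : d.get? x with
            | none => rw [hg] at hy'; simp at hy'
            | some v =>
                rw [hg] at hy'
                have := PySem.Dict.mem_items_of_get?_eq_some (d := d) hg
                exact ⟨v, List.mem_map.mpr ⟨(x, v), this, rfl⟩, hy'⟩
        obtain ⟨c1, c2, c3⟩ := ih (satStep d S) hnd' hU' (by omega)
        rw [hr]
        refine ⟨?_, ?_, c3⟩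
        · intro y hy
          exact c1 (by rw [hΔ']; exact List.mem_append_left _ hy)
        · intro T hT hS y hy
          refine c2 T hT ?_ y hy
          intro z hz
          rcases (mem_satStep d S z).mp hz with h | ⟨x, hx, hz'⟩
          · exact hS z h
          · exact hT x (hS x hx) z hz'


theorem goodSat (d : PySem.Dict String (List String)) (l : String) :
    GoodFrom d l (reachSat d l) := by
  have h0nd : (PySem.List.dedup (d.getD l [])).Nodup := PySem.List.nodup_dedup _
  have h0U : ∀ y ∈ PySem.List.dedup (d.getD l []), y ∈ pvUniv d := by
    intro y hy
    rw [PySem.List.mem_dedup] at hy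
    simp only [pvUniv, PySem.List.mem_dedup, List.mem_flatten]
    rw [PySem.Dict.getD_eq_get?_getD] at hy
    cases hg : d.get? l with
    | none => rw [hg] at hy; simp at hy
    | some v =>
        rw [hg] at hy
        have := PySem.Dict.mem_items_of_get?_eq_some (d := d) hg
        exact ⟨v, List.mem_map.mpr ⟨(l, v), this, rfl⟩, hy⟩
  obtain ⟨c1, c2, c3⟩ := satAux_spec d ((pvUniv d).length + 1) _ h0nd h0U (by omega)
  constructor
  · constructor
    · intro y hy
      exact c1 (by rw [PySem.List.mem_dedup]; exact hy)
    · intro x hx y hy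
      show y ∈ reachSat d l
      rw [reachSat, ← c3, mem_satStep]
      exact Or.inr ⟨x, hx, hy⟩
  · intro T hT y hy
    exact c2 T hT.2 (fun z hz => hT.1 z ((PySem.List.mem_dedup _ _).mp hz)) y hy


theorem foldA_spec (ys : List String) :
    ∀ (S K : List String), ∃ Δ : List String,
      ys.foldl (fun (acc : List String × List String) sup =>
          if sup ∈ acc.1 then acc else (acc.1 ++ [sup], sup :: acc.2)) (S, K)
        = (S ++ Δ, Δ.reverse ++ K)
      ∧ Δ.Nodup ∧ (∀ y ∈ Δ, y ∈ ys ∧ y ∉ S) ∧ (∀ y ∈ ys, y ∈ S ++ Δ) := by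
  induction ys with
  | nil => exact fun S K => ⟨[], by simp⟩
  | cons a ys ih =>
      intro S K
      by_cases ha : a ∈ S
      · obtain ⟨Δ, heq, hnd, hmem, hcov⟩ := ih S K
        refine ⟨Δ, ?_, hnd, ?_, ?_⟩
        · simpa [List.foldl_cons, ha] using heq
        · exact fun y hy => ⟨List.mem_cons_of_mem _ (hmem y hy).1, (hmem y hy).2⟩
        · intro y hy
          rcases List.mem_cons.mp hy with rfl | hy
          · exact List.mem_append_left _ ha
          · exact hcov y hy
      · obtain ⟨Δ', heq, hnd, hmem, hcov⟩ := ih (S ++ [a]) (a :: K)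
        refine ⟨a :: Δ', ?_, ?_, ?_, ?_⟩
        · have h1 : (a :: ys).foldl (fun (acc : List String × List String) sup =>
              if sup ∈ acc.1 then acc else (acc.1 ++ [sup], sup :: acc.2)) (S, K)
              = ys.foldl (fun (acc : List String × List String) sup =>
              if sup ∈ acc.1 then acc else (acc.1 ++ [sup], sup :: acc.2)) (S ++ [a], a :: K) := by
            simp [List.foldl_cons, ha]
          rw [h1, heq]
          simp [List.append_assoc]
        · refine List.nodup_cons.mpr ⟨?_, hnd⟩
          intro hc
          exact (hmem a hc).2 (List.mem_append_right _ (List.mem_singleton.mpr rfl))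
        · intro y hy
          rcases List.mem_cons.mp hy with rfl | hy
          · exact ⟨List.mem_cons_self, ha⟩
          · refine ⟨List.mem_cons_of_mem _ (hmem y hy).1, fun hc => (hmem y hy).2 (List.mem_append_left _ hc)⟩
        · intro y hy
          rcases List.mem_cons.mp hy with rfl | hy
          · simp
          · have := hcov y hy
            simpa [List.append_assoc] using this


theorem gsAuxA_spec (d : PySem.Dict String (List String)) (l : String) :
    ∀ (f : Nat), ∀ (S K : List String),
      (∀ y ∈ K, y = l ∨ y ∈ S) →
      (∀ x, (x = l ∨ x ∈ S) → x ∉ K → ∀ y ∈ d.getD x [], y ∈ S) →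
      2 * phiD d S + K.length ≤ f →
      (∀ T, ClosedP d l T → (∀ y ∈ S, T y) → ∀ y ∈ gsAuxA d f S K, T y) ∧
      (∀ x, (x = l ∨ x ∈ gsAuxA d f S K) → ∀ y ∈ d.getD x [], y ∈ gsAuxA d f S K) := by
  intro f
  induction f with
  | zero =>
      intro S K hK hI3 hfuel
      have hKnil : K = [] := List.length_eq_zero_iff.mp (by omega)
      subst hKnil
      constructor
      · intro T _ hS y hy; exact hS y hy
      · intro x hx y hy
        exact hI3 x (by simpa [gsAuxA] using hx) (List.not_mem_nil) y hy
  | succ f ih =>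
      intro S K hK hI3 hfuel
      cases K with
      | nil =>
          constructor
          · intro T _ hS y hy; exact hS y hy
          · intro x hx y hy
            exact hI3 x (by simpa [gsAuxA] using hx) (List.not_mem_nil) y hy
      | cons current K' =>
          obtain ⟨Δ, heq, hnd, hmemΔ, hcov⟩ := foldA_spec (d.getD current []) S K'
          have hstep : gsAuxA d (f + 1) S (current :: K')
              = gsAuxA d f (S ++ Δ) (Δ.reverse ++ K') := by
            simp only [gsAuxA, heq]
          have hUΔ : ∀ y ∈ Δ, y ∈ pvUniv d :=
            fun y hy => mem_pvUniv d current y (hmemΔ y hy).1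
          have hφ := phi_append d S Δ hnd hUΔ (fun y hy => (hmemΔ y hy).2)
          have spec := ih (S ++ Δ) (Δ.reverse ++ K')
            (by
              intro y hy
              rcases List.mem_append.mp hy with hy | hy
              · exact Or.inr (List.mem_append_right _ (List.mem_reverse.mp hy))
              · rcases hK y (List.mem_cons_of_mem _ hy) with h | h
                · exact Or.inl h
                · exact Or.inr (List.mem_append_left _ h))
            (by
              intro x hx hxK y hy
              by_cases hxΔ : x ∈ Δ
              · exact absurd (List.mem_append_left _ (List.mem_reverse.mpr hxΔ)) hxK
              · by_cases hxc : x = current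
                · subst hxc; exact hcov y hy
                · have hx' : x = l ∨ x ∈ S := by
                    rcases hx with h | h
                    · exact Or.inl h
                    · rcases List.mem_append.mp h with h | h
                      · exact Or.inr h
                      · exact absurd h hxΔ
                  have hxK0 : x ∉ current :: K' := by
                    intro hc
                    rcases List.mem_cons.mp hc with h | h
                    · exact hxc h
                    · exact hxK (List.mem_append_right _ h)
                  exact List.mem_append_left _ (hI3 x hx' hxK0 y hy))
            (by
              have : (Δ.reverse ++ K').length = Δ.length + K'.length := by simp
              simp only [List.length_cons] at hfuel
              omega)
          rw [hstep]
          constructor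
          · intro T hT hS y hy
            refine spec.1 T hT ?_ y hy
            intro z hz
            rcases List.mem_append.mp hz with hz | hz
            · exact hS z hz
            · have hzc : z ∈ d.getD current [] := (hmemΔ z hz).1
              rcases hK current List.mem_cons_self with h | h
              · subst h; exact hT.1 z hzc
              · exact hT.2 current (hS current h) z hzc
          · exact spec.2


theorem goodA (d : PySem.Dict String (List String)) (l : String) :
    GoodFrom d l (getSupersetsA d l) := by
  have spec := gsAuxA_spec d l (pvFuel d) [] [l]
    (by intro y hy; exact Or.inl (List.mem_singleton.mp hy))
    (by
      intro x hx hxK y hy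
      rcases hx with rfl | h
      · exact absurd (List.mem_singleton.mpr rfl) hxK
      · exact absurd h (List.not_mem_nil))
    (by
      have := phi_le d []
      simp only [pvFuel, List.length_singleton]
      omega)
  refine ⟨⟨?_, ?_⟩, ?_⟩
  · exact fun y hy => spec.2 l (Or.inl rfl) y hy
  · exact fun x hx y hy => spec.2 x (Or.inr hx) y hy
  · intro T hT y hy
    exact spec.1 T hT (fun z hz => absurd hz (List.not_mem_nil)) y hy


theorem foldB_spec (ys : List String) :
    ∀ (S P : List String), ∃ Δ : List String,
      ys.foldl (fun (acc : List String × List String) sup =>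
          if sup ∈ acc.1 then acc else (acc.1 ++ [sup], acc.2 ++ [sup])) (S, P)
        = (S ++ Δ, P ++ Δ)
      ∧ Δ.Nodup ∧ (∀ y ∈ Δ, y ∈ ys ∧ y ∉ S) ∧ (∀ y ∈ ys, y ∈ S ++ Δ) := by
  induction ys with
  | nil => exact fun S P => ⟨[], by simp⟩
  | cons a ys ih =>
      intro S P
      by_cases ha : a ∈ S
      · obtain ⟨Δ, heq, hnd, hmem, hcov⟩ := ih S P
        refine ⟨Δ, by simpa [List.foldl_cons, ha] using heq, hnd, ?_, ?_⟩
        · exact fun y hy => ⟨List.mem_cons_of_mem _ (hmem y hy).1, (hmem y hy).2⟩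
        · intro y hy
          rcases List.mem_cons.mp hy with rfl | hy
          · exact List.mem_append_left _ ha
          · exact hcov y hy
      · obtain ⟨Δ', heq, hnd, hmem, hcov⟩ := ih (S ++ [a]) (P ++ [a])
        refine ⟨a :: Δ', ?_, ?_, ?_, ?_⟩
        · have h1 : (a :: ys).foldl (fun (acc : List String × List String) sup =>
              if sup ∈ acc.1 then acc else (acc.1 ++ [sup], acc.2 ++ [sup])) (S, P)
              = ys.foldl (fun (acc : List String × List String) sup =>
              if sup ∈ acc.1 then acc else (acc.1 ++ [sup], acc.2 ++ [sup])) (S ++ [a], P ++ [a]) := by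
            simp [List.foldl_cons, ha]
          rw [h1, heq]
          simp [List.append_assoc]
        · refine List.nodup_cons.mpr ⟨?_, hnd⟩
          intro hc
          exact (hmem a hc).2 (List.mem_append_right _ (List.mem_singleton.mpr rfl))
        · intro y hy
          rcases List.mem_cons.mp hy with rfl | hy
          · exact ⟨List.mem_cons_self, ha⟩
          · refine ⟨List.mem_cons_of_mem _ (hmem y hy).1, fun hc => (hmem y hy).2 (List.mem_append_left _ hc)⟩
        · intro y hy
          rcases List.mem_cons.mp hy with rfl | hy
          · simp
          · have := hcov y hy
            simpa [List.append_assoc] using this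


theorem gsAuxB_spec (d : PySem.Dict String (List String)) (l : String) :
    ∀ (f : Nat), ∀ (out seen pending : List String),
      (∀ y ∈ pending, y = l ∨ y ∈ seen) →
      (∀ x, (x = l ∨ x ∈ seen) → x ∉ pending → ∀ y ∈ d.getD x [], y ∈ seen) →
      (out ++ pending).drop 1 = seen →
      2 * phiD d seen + pending.length ≤ f →
      (∀ T, ClosedP d l T → (∀ y ∈ seen, T y) →
        ∀ y ∈ (gsAuxB d f out seen pending).drop 1, T y) ∧
      (∀ x, (x = l ∨ x ∈ (gsAuxB d f out seen pending).drop 1) →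
        ∀ y ∈ d.getD x [], y ∈ (gsAuxB d f out seen pending).drop 1) := by
  intro f
  induction f with
  | zero =>
      intro out seen pending hK hI3 hOut hfuel
      have hPnil : pending = [] := List.length_eq_zero_iff.mp (by omega)
      subst hPnil
      simp only [List.append_nil] at hOut
      have hR : (gsAuxB d 0 out seen []).drop 1 = seen := by
        simpa [gsAuxB] using hOut
      rw [hR]
      exact ⟨fun T _ hS y hy => hS y hy, fun x hx y hy => hI3 x hx (List.not_mem_nil) y hy⟩
  | succ f ih =>
      intro out seen pending hK hI3 hOut hfuel
      cases pending with
      | nil =>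
          simp only [List.append_nil] at hOut
          have hR : (gsAuxB d (f + 1) out seen []).drop 1 = seen := by
            simpa [gsAuxB] using hOut
          rw [hR]
          exact ⟨fun T _ hS y hy => hS y hy, fun x hx y hy => hI3 x hx (List.not_mem_nil) y hy⟩
      | cons current P =>
          obtain ⟨Δ, heq, hnd, hmemΔ, hcov⟩ := foldB_spec (d.getD current []) seen P
          have hstep : gsAuxB d (f + 1) out seen (current :: P)
              = gsAuxB d f (out ++ [current]) (seen ++ Δ) (P ++ Δ) := by
            simp only [gsAuxB, heq]
          have hUΔ : ∀ y ∈ Δ, y ∈ pvUniv d :=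
            fun y hy => mem_pvUniv d current y (hmemΔ y hy).1
          have hφ := phi_append d seen Δ hnd hUΔ (fun y hy => (hmemΔ y hy).2)
          have hOut' : ((out ++ [current]) ++ (P ++ Δ)).drop 1 = seen ++ Δ := by
            have h1 : (out ++ [current]) ++ (P ++ Δ) = (out ++ current :: P) ++ Δ := by
              simp [List.append_assoc]
            have h2 : ((out ++ current :: P) ++ Δ).drop 1 = (out ++ current :: P).drop 1 ++ Δ := by
              refine List.drop_append_of_le_length ?_
              simp
              omega
            rw [h1, h2, hOut]
          have spec := ih (out ++ [current]) (seen ++ Δ) (P ++ Δ)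
            (by
              intro y hy
              rcases List.mem_append.mp hy with hy | hy
              · rcases hK y (List.mem_cons_of_mem _ hy) with h | h
                · exact Or.inl h
                · exact Or.inr (List.mem_append_left _ h)
              · exact Or.inr (List.mem_append_right _ hy))
            (by
              intro x hx hxP y hy
              by_cases hxΔ : x ∈ Δ
              · exact absurd (List.mem_append_right _ hxΔ) hxP
              · by_cases hxc : x = current
                · subst hxc; exact hcov y hy
                · have hx' : x = l ∨ x ∈ seen := by
                    rcases hx with h | h
                    · exact Or.inl h
                    · rcases List.mem_append.mp h with h | h
                      · exact Or.inr h
                      · exact absurd h hxΔ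
                  have hxK0 : x ∉ current :: P := by
                    intro hc
                    rcases List.mem_cons.mp hc with h | h
                    · exact hxc h
                    · exact hxP (List.mem_append_left _ h)
                  exact List.mem_append_left _ (hI3 x hx' hxK0 y hy))
            hOut'
            (by
              simp only [List.length_append, List.length_cons] at hfuel ⊢
              omega)
          rw [hstep]
          constructor
          · intro T hT hS y hy
            refine spec.1 T hT ?_ y hy
            intro z hz
            rcases List.mem_append.mp hz with hz | hz
            · exact hS z hz
            · have hzc : z ∈ d.getD current [] := (hmemΔ z hz).1
              rcases hK current List.mem_cons_self with h | h
              · subst h; exact hT.1 z hzc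
              · exact hT.2 current (hS current h) z hzc
          · exact spec.2


theorem goodB (d : PySem.Dict String (List String)) (l : String) :
    GoodFrom d l (getSupersetsB d l) := by
  have spec := gsAuxB_spec d l (pvFuel d) [] [] [l]
    (by intro y hy; exact Or.inl (List.mem_singleton.mp hy))
    (by
      intro x hx hxK y hy
      rcases hx with rfl | h
      · exact absurd (List.mem_singleton.mpr rfl) hxK
      · exact absurd h (List.not_mem_nil))
    (by simp)
    (by
      have := phi_le d []
      simp only [pvFuel, List.length_singleton]
      omega)
  refine ⟨⟨?_, ?_⟩, ?_⟩
  · exact fun y hy => spec.2 l (Or.inl rfl) y hy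
  · exact fun x hx y hy => spec.2 x (Or.inr hx) y hy
  · intro T hT y hy
    exact spec.1 T hT (fun z hz => absurd hz (List.not_mem_nil)) y hy


theorem memA_iff_sat (d : PySem.Dict String (List String)) (o x : String) :
    x ∈ getSupersetsA d o ↔ x ∈ reachSat d o :=
  mem_eq_of_good d o _ _ (goodA d o) (goodSat d o) x


theorem memB_iff_sat (d : PySem.Dict String (List String)) (o x : String) :
    x ∈ getSupersetsB d o ↔ x ∈ reachSat d o :=
  mem_eq_of_good d o _ _ (goodB d o) (goodSat d o) x


theorem getD_fold_insert (d : PySem.Dict String (List String)) :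
    ∀ (xs : List String) (t : PySem.Dict String (List String)) (o : String),
      ((xs.foldl (fun (t : PySem.Dict String (List String)) o =>
          t.insert o (PySem.Set.ofList (getSupersetsB d o))) t).getD o [])
        = if o ∈ xs then PySem.Set.ofList (getSupersetsB d o) else t.getD o [] := by
  intro xs
  induction xs with
  | nil => intro t o; simp
  | cons a xs ih =>
      intro t o
      simp only [List.foldl_cons, ih, List.mem_cons]
      by_cases hx : o ∈ xs
      · simp [hx]
      · by_cases ha : o = a
        · subst ha; simp [hx]
        · simp [hx, ha, PySem.Dict.getD_insert]


theorem find?_eq_some_of (L : List String) (p : String → Bool) (x : String)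
    (h1 : ∀ y ∈ L, p y = true → y = x) (h2 : x ∈ L) (h3 : p x = true) :
    L.find? p = some x := by
  induction L with
  | nil => exact absurd h2 (List.not_mem_nil)
  | cons b t ih =>
      cases hb : p b with
      | true =>
          rw [List.find?_cons_of_pos hb]
          exact congrArg some (h1 b List.mem_cons_self hb)
      | false =>
          rw [List.find?_cons_of_neg (by simp [hb])]
          refine ih (fun y hy hp => h1 y (List.mem_cons_of_mem _ hy) hp) ?_
          rcases List.mem_cons.mp h2 with rfl | hx
          · rw [h3] at hb; exact absurd hb (by simp)
          · exact hx


theorem pyGet?_head (L : List String) (x : String) (hne : L ≠ [])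
    (hall : ∀ y ∈ L, y = x) : PySem.List.pyGet? L 0 = some x := by
  cases L with
  | nil => exact absurd rfl hne
  | cons a t =>
      have : a = x := hall a List.mem_cons_self
      subst this
      simp [PySem.List.pyGet?, PySem.List.pyIdx?]


theorem common_logic_agree (logic1 logic2 : String) (contains : List (String × List String))
    (hpre : Pre_common_logic logic1 logic2 contains) :
    common_logic logic1 logic2 contains = common_logic_alt logic1 logic2 contains := by
  set d := PySem.Dict.ofList contains with hd
  set cS := commonSat logic1 logic2 contains with hcS
  -- the two ports' common lists
  set commonA := PySem.Set.inter (PySem.Set.union (getSupersetsA d logic1) [logic1])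
      (PySem.Set.union (getSupersetsA d logic2) [logic2]) with hcommonA
  set g1 := getSupersetsB d logic1 with hg1
  set g2 := getSupersetsB d logic2 with hg2
  set anc1 := if logic1 ∈ g1 then g1 else g1 ++ [logic1] with hanc1
  set anc2 := if logic2 ∈ g2 then g2 else g2 ++ [logic2] with hanc2
  set commonB := anc1.filter (fun l => anc2.contains l) with hcommonB
  -- membership transfer to the saturation-based common set
  have hanc1mem : ∀ x, x ∈ anc1 ↔ (x ∈ reachSat d logic1 ∨ x = logic1) := by
    intro x
    rw [hanc1]
    by_cases h1 : logic1 ∈ g1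
    · simp only [if_pos h1]
      rw [hg1, memB_iff_sat]
      constructor
      · exact Or.inl
      · rintro (h | rfl)
        · exact h
        · rw [hg1, memB_iff_sat] at h1; exact h1
    · simp only [if_neg h1, List.mem_append, List.mem_singleton]
      rw [hg1, memB_iff_sat]
  have hanc2mem : ∀ x, x ∈ anc2 ↔ (x ∈ reachSat d logic2 ∨ x = logic2) := by
    intro x
    rw [hanc2]
    by_cases h2 : logic2 ∈ g2
    · simp only [if_pos h2]
      rw [hg2, memB_iff_sat]
      constructor
      · exact Or.inl
      · rintro (h | rfl)
        · exact h
        · rw [hg2, memB_iff_sat] at h2; exact h2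
    · simp only [if_neg h2, List.mem_append, List.mem_singleton]
      rw [hg2, memB_iff_sat]
  have hcSmem : ∀ x, x ∈ cS ↔ ((x ∈ reachSat d logic1 ∨ x = logic1) ∧ (x ∈ reachSat d logic2 ∨ x = logic2)) := by
    intro x
    rw [hcS]
    unfold commonSat
    rw [List.mem_filter]
    simp only [List.contains_iff_mem]
    unfold ancSat
    rw [PySem.Set.mem_add, PySem.Set.mem_add, ← hd]
  have hAmem : ∀ x, x ∈ commonA ↔ x ∈ cS := by
    intro x
    rw [hcommonA, PySem.Set.mem_inter, PySem.Set.mem_union, PySem.Set.mem_union,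
      hcSmem x, memA_iff_sat, memA_iff_sat]
    simp
  have hBmem : ∀ x, x ∈ commonB ↔ x ∈ cS := by
    intro x
    rw [hcommonB, List.mem_filter]
    simp only [List.contains_iff_mem]
    rw [hanc1mem x, hanc2mem x, hcSmem x]
  -- the two ports' selection predicates agree with mostSpecSat on their common lists
  have hpredA : ∀ lx,
      (!(commonA.any (fun other => other != lx && (getSupersetsA d other).contains lx)))
        = mostSpecSat d cS lx := by
    intro lx
    rw [Bool.eq_iff_iff]
    simp only [Bool.not_eq_eq_eq_not, Bool.not_true, List.any_eq_false, Bool.and_eq_true,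
      bne_iff_ne, decide_eq_true_eq, not_and, mostSpecSat,
      List.all_eq_true, Bool.or_eq_true, beq_iff_eq, Bool.not_eq_eq_eq_not,
      List.contains_eq_mem, decide_eq_false_iff_not]
    constructor
    · intro h o ho
      have := h o ((hAmem o).mpr ho)
      by_cases he : o = lx
      · exact Or.inl he
      · exact Or.inr (by rw [memA_iff_sat] at this; exact this he)
    · intro h o ho hne
      rcases h o ((hAmem o).mp ho) with he | hm
      · exact absurd he hne
      · rw [memA_iff_sat]; exact hm
  have hancOf := getD_fold_insert d commonB PySem.Dict.empty
  have hpredB : ∀ lx,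
      (commonB.all (fun o => o == lx ||
        !(((commonB.foldl (fun (t : PySem.Dict String (List String)) o =>
            t.insert o (PySem.Set.ofList (getSupersetsB d o))) PySem.Dict.empty).getD o []).contains lx)))
        = mostSpecSat d cS lx := by
    intro lx
    rw [Bool.eq_iff_iff]
    simp only [List.all_eq_true, Bool.or_eq_true, beq_iff_eq, Bool.not_eq_eq_eq_not,
      Bool.not_true, List.contains_eq_mem, decide_eq_false_iff_not,
      mostSpecSat]
    constructor
    · intro h o ho
      have := h o ((hBmem o).mpr ho)
      rcases this with he | hm
      · exact Or.inl he
      · refine Or.inr ?_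
        have he : ((commonB.foldl (fun (t : PySem.Dict String (List String)) o =>
            t.insert o (PySem.Set.ofList (getSupersetsB d o))) PySem.Dict.empty).getD o [])
            = PySem.Set.ofList (getSupersetsB d o) := by
          rw [hancOf o]; exact if_pos ((hBmem o).mpr ho)
        intro hc
        exact hm (by rw [he]; exact (PySem.Set.mem_ofList _ _).mpr ((memB_iff_sat d o lx).mpr hc))
    · intro h o ho
      rcases h o ((hBmem o).mp ho) with he | hm
      · exact Or.inl he
      · refine Or.inr ?_
        have he : ((commonB.foldl (fun (t : PySem.Dict String (List String)) o =>
            t.insert o (PySem.Set.ofList (getSupersetsB d o))) PySem.Dict.empty).getD o [])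
            = PySem.Set.ofList (getSupersetsB d o) := by
          rw [hancOf o]; exact if_pos ho
        intro hc
        have hc2 : lx ∈ PySem.Set.ofList (getSupersetsB d o) := by rw [← he]; exact hc
        exact hm ((memB_iff_sat d o lx).mp ((PySem.Set.mem_ofList _ _).mp hc2))
  -- unfold both ports
  show (if commonA.isEmpty then none
      else PySem.List.pyGet?
        (commonA.filter (fun l =>
          !(commonA.any (fun other => other != l && (getSupersetsA d other).contains l)))) 0)
    = commonB.find? (fun l => commonB.all (fun o => o == l ||
        !(((commonB.foldl (fun (t : PySem.Dict String (List String)) o =>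
            t.insert o (PySem.Set.ofList (getSupersetsB d o))) PySem.Dict.empty).getD o []).contains l)))
  rcases hpre with hemp | hone
  · -- empty common set: both return none
    rw [← hcS] at hemp
    have hA : commonA = [] := by
      apply List.eq_nil_iff_forall_not_mem.mpr
      intro x hx
      exact (List.not_mem_nil) (hemp ▸ (hAmem x).mp hx)
    have hB : commonB = [] := by
      apply List.eq_nil_iff_forall_not_mem.mpr
      intro x hx
      exact (List.not_mem_nil) (hemp ▸ (hBmem x).mp hx)
    rw [hA, hB]
    simp
  · -- unique most-specific element x
    rw [← hcS] at hone
    obtain ⟨x, hfx⟩ := List.length_eq_one_iff.mp hone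
    have hxcS : x ∈ cS ∧ mostSpecSat d cS x = true := by
      have : x ∈ cS.filter (mostSpecSat d cS) := by rw [hfx]; exact List.mem_singleton.mpr rfl
      simpa using List.mem_filter.mp this
    have huniq : ∀ y ∈ cS, mostSpecSat d cS y = true → y = x := by
      intro y hy hp
      have : y ∈ cS.filter (mostSpecSat d cS) := List.mem_filter.mpr ⟨hy, by simpa using hp⟩
      rw [hfx] at this
      exact List.mem_singleton.mp this
    have hxA : x ∈ commonA := (hAmem x).mpr hxcS.1
    have hxB : x ∈ commonB := (hBmem x).mpr hxcS.1
    have hAne : commonA.isEmpty = false := by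
      cases hA : commonA with
      | nil => rw [hA] at hxA; exact absurd hxA (List.not_mem_nil)
      | cons a t => simp
    rw [hAne]
    simp only [Bool.false_eq_true, if_false]
    have hleft : PySem.List.pyGet?
        (commonA.filter (fun l =>
          !(commonA.any (fun other => other != l && (getSupersetsA d other).contains l)))) 0 = some x := by
      apply pyGet?_head
      · intro hc
        have : x ∈ commonA.filter (fun l =>
            !(commonA.any (fun other => other != l && (getSupersetsA d other).contains l))) :=
          List.mem_filter.mpr ⟨hxA, by rw [hpredA x]; exact hxcS.2⟩
        rw [hc] at this
        exact absurd this (List.not_mem_nil)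
      · intro y hy
        have h := List.mem_filter.mp hy
        exact huniq y ((hAmem y).mp h.1) (by rw [← hpredA y]; exact h.2)
    have hright : commonB.find? (fun l => commonB.all (fun o => o == l ||
        !(((commonB.foldl (fun (t : PySem.Dict String (List String)) o =>
            t.insert o (PySem.Set.ofList (getSupersetsB d o))) PySem.Dict.empty).getD o []).contains l)))
        = some x := by
      apply find?_eq_some_of
      · intro y hy hp
        exact huniq y ((hBmem y).mp hy) (by rw [← hpredB y]; exact hp)
      · exact hxB
      · rw [hpredB x]; exact hxcS.2
    rw [hleft, hright]


-- ===== VERDICT (by name: the statement is the Claim_ definition above) =====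
theorem common_logic_spec : Claim_equal_common_logic := by
  intro logic1 logic2 contains _ hpre
  unfold Spec_common_logic
  exact common_logic_agree logic1 logic2 contains hpre

@[simp] theorem common_logic_raises : Claim_raises_common_logic := by
  unfold Claim_raises_common_logic
  constructor
  · intro l1 l2 c _ hr hp
    rcases hr with ⟨hne, hfe⟩
    rcases hp with h | h
    · exact hne h
    · rw [hfe] at h; simp at h
  · exact ⟨by decide, by decide, by decide⟩
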